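-- pv_equiv track=rewrite | github.com/Kovacs-666/Cryptography-Tool-with-Python | crypto_functions.py | encode_to_matrix
-- ===== SOURCE A (Python) =====
-- def create_matrix(row_length, column_length):
--     """
--     The function expects two integers `row_length` and `column_length`
--     as input and returns a matrix of dimension `row_length` x `column_length`
--     which contains space characters(`' '`)
--     """
--     outter_list = []
--     for i in range(row_length):
--         inner_list = []
--         for j in range(column_length):
--             inner_list.append(' ')
--         outter_list.append(inner_list)
--     return outter_list
--
-- def encode_to_matrix(message_string, column_length):
--     """
--     The function takes a string `message_string` and an integer
--     `column_length` as integer and "writes" the message string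
--     on to a matrix that has `column_length` many columns.
--     """
--     if len(message_string)%column_length != 0:
--         num_rows = int(len(message_string)/column_length)+1
--     elif len(message_string)%column_length == 0:
--         num_rows = int(len(message_string)/column_length)
--
--     new_list = create_matrix(num_rows, column_length)
--
--     k = 0
--     for i in range(num_rows):
--         for j in range(column_length):
--             new_list[i][j] = message_string[k]
--             k += 1
--             if k == len(message_string):
--                 break
--         if k == len(message_string):
--             break
--     return new_list
-- ===== SOURCE B (Python) =====
-- def encode_to_matrix(message_string, column_length):
--     n = len(message_string)
--     num_rows = int(n / column_length) + (1 if n % column_length != 0 else 0)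
--     rows = []
--     for i in range(num_rows):
--         chunk = message_string[i * column_length:(i + 1) * column_length]
--         rows.append(list(chunk) + [' '] * (column_length - len(chunk)))
--     return rows
-- ===== Notes on version B (the rewrite author's own statement) =====
-- stated objective: simpler
-- what changed: B builds each row directly by slicing the string per row index and right-padding with spaces, eliminating A's pre-built all-space matrix, the per-cell inner write loop with counter k, and the double-break termination.
import Mathlib
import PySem

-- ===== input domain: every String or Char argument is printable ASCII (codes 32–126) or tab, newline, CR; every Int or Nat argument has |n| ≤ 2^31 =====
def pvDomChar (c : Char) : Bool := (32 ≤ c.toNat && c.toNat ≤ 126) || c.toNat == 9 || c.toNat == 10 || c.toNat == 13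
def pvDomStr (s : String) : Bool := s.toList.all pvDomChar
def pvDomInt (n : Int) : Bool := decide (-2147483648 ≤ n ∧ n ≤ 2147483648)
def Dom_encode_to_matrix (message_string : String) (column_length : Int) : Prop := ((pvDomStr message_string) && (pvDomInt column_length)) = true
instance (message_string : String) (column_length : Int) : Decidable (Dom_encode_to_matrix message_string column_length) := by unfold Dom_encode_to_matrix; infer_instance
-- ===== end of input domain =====

-- B replaces A's pre-built space matrix + per-cell write loop with a per-row slice-and-pad construction (objective: simpler).

-- ===== PORT A =====
-- create_matrix: rows of ' ' cells, built by two range loops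
def pvCreateMatrix (row_length column_length : Int) : List (List String) :=
  (PySem.List.pyRange 0 row_length 1).map (fun _ =>
    (PySem.List.pyRange 0 column_length 1).map (fun _ => " "))

-- the inner j-loop: write message chars cell by cell; when the chars run out (k == len) break,
-- leaving the rest of the row as spaces. Returns (updated row, remaining chars).
def pvFillRow : List String → List Char → List String × List Char
  | row, [] => (row, [])
  | [], cs => ([], cs)
  | _ :: row, c :: cs =>
      let p := pvFillRow row cs
      (String.mk [c] :: p.1, p.2)

-- the outer i-loop with its break: once the chars are exhausted, the remaining rows stay untouched
def pvFillRows : List (List String) → List Char → List (List String)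
  | [], _ => []
  | row :: rest, cs =>
      let p := pvFillRow row cs
      p.1 :: (if p.2 = [] then rest else pvFillRows rest p.2)

def encode_to_matrix (message_string : String) (column_length : Int) : List (List String) :=
  let len : Int := PySem.Str.len message_string
  -- int(len/col) is float division truncated toward zero: exact as truncdiv on the stated domain
  let num_rows : Int :=
    if PySem.Int.mod len column_length ≠ 0 then PySem.Int.truncdiv len column_length + 1
    else PySem.Int.truncdiv len column_length
  pvFillRows (pvCreateMatrix num_rows column_length) message_string.toList

-- ===== PORT B =====
def pvPadRow (chunk : List Char) (column_length : Int) : List String :=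
  chunk.map (fun c => String.mk [c]) ++ List.replicate (column_length - (chunk.length : Int)).toNat " "

def encode_to_matrix_alt (message_string : String) (column_length : Int) : List (List String) :=
  let n : Int := PySem.Str.len message_string
  let num_rows : Int :=
    PySem.Int.truncdiv n column_length + (if PySem.Int.mod n column_length ≠ 0 then 1 else 0)
  (PySem.List.pyRange 0 num_rows 1).map (fun i =>
    pvPadRow (PySem.List.slice message_string.toList
                (some (i * column_length)) (some ((i + 1) * column_length))) column_length)

-- ===== PRECONDITION & SPEC =====
-- Pre_ excludes only column_length = 0, where Python A raises ZeroDivisionError.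
def Pre_encode_to_matrix (message_string : String) (column_length : Int) : Prop := column_length ≠ 0
instance (message_string : String) (column_length : Int) : Decidable (Pre_encode_to_matrix message_string column_length) := by unfold Pre_encode_to_matrix; infer_instance
def pvWitness_encode_to_matrix : String × Int := ("HELLO", 3)

def Spec_encode_to_matrix (message_string : String) (column_length : Int) (out : List (List String)) : Prop := out = encode_to_matrix_alt message_string column_length
instance (message_string : String) (column_length : Int) (out : List (List String)) : Decidable (Spec_encode_to_matrix message_string column_length out) := by unfold Spec_encode_to_matrix; infer_instance

-- ===== CLAIM (what is proved, stated in full; the proofs are below) =====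
def Claim_equal_encode_to_matrix : Prop := ∀ (message_string : String) (column_length : Int), Dom_encode_to_matrix message_string column_length → Pre_encode_to_matrix message_string column_length → Spec_encode_to_matrix message_string column_length (encode_to_matrix message_string column_length)

-- ===== LEMMAS AND PROOFS =====

-- common description of the result: r rows, each the next c chars padded with spaces to width c
def pvChunk : Nat → Nat → List Char → List (List String)
  | 0, _, _ => []
  | r+1, c, cs =>
      ((cs.take c).map (fun ch => String.mk [ch]) ++ List.replicate (c - cs.length) " ")
        :: pvChunk r c (cs.drop c)

theorem pvChunk_nil (r c : Nat) : pvChunk r c [] = List.replicate r (List.replicate c " ") := by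
  induction r with
  | zero => rfl
  | succ r ih => simp [pvChunk, ih, List.replicate_succ]

theorem pvFillRow_replicate (m : Nat) (cs : List Char) :
    pvFillRow (List.replicate m " ") cs
      = ((cs.take m).map (fun ch => String.mk [ch]) ++ List.replicate (m - cs.length) " ",
         cs.drop m) := by
  induction m generalizing cs with
  | zero => cases cs <;> simp [pvFillRow]
  | succ m ih =>
    cases cs with
    | nil => simp [pvFillRow]
    | cons c cs => simp [List.replicate_succ, pvFillRow, ih]

theorem pvFillRows_replicate (r c : Nat) (cs : List Char) :
    pvFillRows (List.replicate r (List.replicate c " ")) cs = pvChunk r c cs := by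
  induction r generalizing cs with
  | zero => rfl
  | succ r ih =>
    simp only [List.replicate_succ, pvFillRows, pvFillRow_replicate, pvChunk]
    by_cases h : cs.drop c = [] <;> simp [h, ih, pvChunk_nil]

theorem pvCreateMatrix_eq (r c : Int) :
    pvCreateMatrix r c = List.replicate r.toNat (List.replicate c.toNat " ") := by
  unfold pvCreateMatrix
  rw [List.map_const', List.map_const', PySem.List.length_pyRange_one,
      PySem.List.length_pyRange_one]
  simp

-- B's row map over the index range, generalised over the starting row index
theorem pvAlt_rows (cn : Nat) (cs : List Char) (r a : Nat) :
    (PySem.List.pyRange (a : Int) ((a : Int) + (r : Int)) 1).map (fun i =>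
        pvPadRow (PySem.List.slice cs (some (i * (cn : Int))) (some ((i + 1) * (cn : Int)))) (cn : Int))
      = pvChunk r cn (cs.drop (a * cn)) := by
  induction r generalizing a with
  | zero =>
    rw [PySem.List.pyRange_one_eq_nil (by push_cast; omega)]
    rfl
  | succ r ih =>
    rw [PySem.List.pyRange_one_cons (by push_cast; omega)]
    simp only [List.map_cons]
    have h1 : ((a : Int) + 1) * (cn : Int) = ((a * cn + cn : Nat) : Int) := by push_cast; ring
    have h2 : (a : Int) * (cn : Int) = ((a * cn : Nat) : Int) := by push_cast; ring
    rw [h1, h2, PySem.List.slice_natCast]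
    have h4 : (a : Int) + ((r + 1 : Nat) : Int) = ((a + 1 : Nat) : Int) + (r : Int) := by push_cast; ring
    have h3 : (a : Int) + 1 = ((a + 1 : Nat) : Int) := by push_cast; ring
    rw [h4, h3, ih (a + 1)]
    have hset : a * cn + cn - a * cn = cn := by omega
    rw [hset, pvChunk]
    congr 1
    · -- head row: B's pad equals pvChunk's pad
      unfold pvPadRow
      congr 1
      have hlt : ((cs.drop (a * cn)).take cn).length = min cn (cs.drop (a * cn)).length := by
        simp
      have hc2 : (((cn : Nat) : Int) - (((cs.drop (a * cn)).take cn).length : Int)).toNat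
           = cn - (cs.drop (a * cn)).length := by
        rw [hlt]; omega
      rw [hc2]
    · -- tail rows: shift the drop
      rw [List.drop_drop]
      congr 1
      ring

-- for negative column_length with at least one row, the message is shorter than |c|
theorem pvNegRow_len (L c : Int) (hL : 0 ≤ L) (hc : c < 0)
    (h : 0 < PySem.Int.truncdiv L c + (if PySem.Int.mod L c ≠ 0 then 1 else 0)) :
    L + c < 0 ∧ PySem.Int.truncdiv L c + (if PySem.Int.mod L c ≠ 0 then 1 else 0) ≤ 1 := by
  simp only [PySem.Int.truncdiv, PySem.Int.mod] at h ⊢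
  have hneg : L.tdiv c = -(L.tdiv (-c)) := by rw [← Int.tdiv_neg]; ring_nf
  have hnn : 0 ≤ L.tdiv (-c) := Int.tdiv_nonneg hL (by omega)
  have htd0 : L.tdiv c = 0 := by split_ifs at h <;> omega
  have h2 : L < -c := by
    by_contra hcon
    push_neg at hcon
    have he : L.tdiv (-c) = L / (-c) := Int.tdiv_eq_ediv_of_nonneg hL
    have : (1:Int) ≤ L / (-c) := by
      rw [Int.le_ediv_iff_mul_le (by omega)]
      omega
    omega
  constructor
  · omega
  · split_ifs <;> omega

theorem encode_to_matrix_spec : Claim_equal_encode_to_matrix := by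
  intro s c _hdom hc
  unfold Pre_encode_to_matrix at hc
  unfold Spec_encode_to_matrix
  simp only [encode_to_matrix, encode_to_matrix_alt]
  have hr : (if PySem.Int.mod (PySem.Str.len s) c ≠ 0 then PySem.Int.truncdiv (PySem.Str.len s) c + 1
             else PySem.Int.truncdiv (PySem.Str.len s) c)
          = PySem.Int.truncdiv (PySem.Str.len s) c + (if PySem.Int.mod (PySem.Str.len s) c ≠ 0 then 1 else 0) := by
    split_ifs <;> ring
  rw [hr]
  have hLnn : (0:Int) ≤ PySem.Str.len s := by rw [PySem.Str.len_eq]; positivity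
  set r : Int := PySem.Int.truncdiv (PySem.Str.len s) c + (if PySem.Int.mod (PySem.Str.len s) c ≠ 0 then 1 else 0) with hrdef
  rcases Int.lt_or_le r 0 with hr0 | hr0
  · -- r < 0: both sides empty
    rw [PySem.List.pyRange_one_eq_nil (by omega)]
    have h0 : r.toNat = 0 := by omega
    rw [pvCreateMatrix_eq, h0]
    rfl
  rcases Int.lt_or_le 0 c with hcpos | hcneg
  · -- positive column count: both sides are pvChunk rn cn (toList s)
    obtain ⟨rn, hrn⟩ : ∃ n : Nat, r = (n : Int) := ⟨r.toNat, by omega⟩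
    obtain ⟨cn, hcn⟩ : ∃ n : Nat, c = (n : Int) := ⟨c.toNat, by omega⟩
    rw [hrn, hcn, pvCreateMatrix_eq]
    simp only [Int.toNat_natCast]
    rw [pvFillRows_replicate]
    have := pvAlt_rows cn s.toList rn 0
    simp only [Nat.cast_zero, zero_add, Nat.zero_mul, List.drop_zero] at this
    exact this.symm
  · -- c < 0: every row is empty on both sides
    have hcneg' : c < 0 := lt_of_le_of_ne hcneg hc
    have hrows : pvCreateMatrix r c = List.replicate r.toNat [] := by
      rw [pvCreateMatrix_eq]
      have h0 : c.toNat = 0 := by omega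
      rw [h0]
      rfl
    rw [hrows]
    have hA : ∀ (n : Nat) (cs : List Char), pvFillRows (List.replicate n []) cs = List.replicate n [] := by
      intro n
      induction n with
      | zero => intro cs; rfl
      | succ n ih =>
        intro cs
        cases cs with
        | nil => simp [List.replicate_succ, pvFillRows, pvFillRow]
        | cons x xs => simp [List.replicate_succ, pvFillRows, pvFillRow, ih]
    rw [hA]
    have hB : ∀ i ∈ PySem.List.pyRange 0 r 1,
        pvPadRow (PySem.List.slice s.toList (some (i * c)) (some ((i + 1) * c))) c = [] := by
      intro i hi
      rw [PySem.List.mem_pyRange_one] at hi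
      have hpos : 0 < r := by omega
      rw [hrdef] at hpos
      obtain ⟨hLc, hr1⟩ := pvNegRow_len (PySem.Str.len s) c hLnn hcneg' hpos
      rw [← hrdef] at hr1
      have hi0 : i = 0 := by omega
      subst hi0
      have hlenlist : PySem.Str.len s = (s.toList.length : Int) := PySem.Str.len_eq s
      have hslice : PySem.List.slice s.toList (some ((0:Int) * c)) (some (((0:Int) + 1) * c)) = [] := by
        have e1 : (0:Int) * c = 0 := by ring
        have e2 : ((0:Int) + 1) * c = c := by ring
        rw [e1, e2]
        have hstart : PySem.List.clampIdx s.toList.length (0:Int) = 0 := by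
          simp [PySem.List.clampIdx]
        have hstop : PySem.List.clampIdx s.toList.length c = 0 := by
          have hneg : (s.toList.length : Int) + c < 0 := by omega
          simp only [PySem.List.clampIdx]
          split_ifs <;> omega
        have hstop' : PySem.List.clampIdx s.length c = 0 := by simpa using hstop
        simp [PySem.List.slice, hstop']
      rw [hslice]
      unfold pvPadRow
      simp
      omega
    rw [List.map_congr_left hB, List.map_const']
    simp [PySem.List.length_pyRange_one]
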